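-- pv_equiv track=rewrite | github.com/Ryclock/algorithm | association_rules/Apriori_imple.py | get_items_first
-- ===== SOURCE A (Python) =====
-- def get_items_first(dataset):
--     items = []
--     for e in dataset:
--         for i in e:
--             if [i] not in items:
--                 items.append([i])
--     items.sort()
--     return items
-- ===== SOURCE B (Python) =====
-- def get_items_first(dataset):
--     flat = []
--     for e in dataset:
--         flat.extend(e)
--     flat.sort()
--     uniq = []
--     for x in flat:
--         if not uniq or uniq[-1] != x:
--             uniq.append(x)
--     return [[x] for x in uniq]
-- ===== Notes on version B (the rewrite author's own statement) =====
-- stated objective: faster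
-- what changed: Replaces the quadratic membership-test dedup of singleton lists by flatten + sort of the plain items + one linear adjacent-dedup pass, wrapping kept items as singletons at the end.
import Mathlib
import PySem

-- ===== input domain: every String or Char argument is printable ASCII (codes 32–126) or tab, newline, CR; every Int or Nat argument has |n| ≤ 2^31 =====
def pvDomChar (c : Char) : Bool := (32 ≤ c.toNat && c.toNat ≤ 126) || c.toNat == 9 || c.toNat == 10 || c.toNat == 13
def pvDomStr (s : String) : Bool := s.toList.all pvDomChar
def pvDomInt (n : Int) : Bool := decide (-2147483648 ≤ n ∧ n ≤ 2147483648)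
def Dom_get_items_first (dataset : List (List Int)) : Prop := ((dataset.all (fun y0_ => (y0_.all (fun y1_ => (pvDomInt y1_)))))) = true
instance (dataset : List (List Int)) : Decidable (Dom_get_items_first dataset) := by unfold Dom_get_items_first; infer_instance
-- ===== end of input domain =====

-- B replaces A's quadratic membership-test dedup by flatten + sort + one adjacent-dedup pass (faster).

-- ===== PORT A =====
-- items accumulates first occurrences of [i]; then items.sort() (Python list-lex order).
def get_items_first (dataset : List (List Int)) : List (List Int) :=
  let items := dataset.foldl (fun items e =>
      e.foldl (fun items i => if [i] ∈ items then items else items ++ [[i]]) items) []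
  PySem.List.sorted items (id : List Int → List Int)

-- ===== PORT B =====
def get_items_first_alt (dataset : List (List Int)) : List (List Int) :=
  let flat := dataset.foldl (fun acc e => acc ++ e) []
  let sortedFlat := PySem.List.sorted flat (id : Int → Int)
  let uniq := sortedFlat.foldl (fun uniq x =>
      if uniq.getLast? = some x then uniq else uniq ++ [x]) []
  uniq.map (fun x => [x])

-- ===== PRECONDITION & SPEC =====
def Spec_get_items_first (dataset : List (List Int)) (out : List (List Int)) : Prop := out = get_items_first_alt dataset
instance (dataset : List (List Int)) (out : List (List Int)) : Decidable (Spec_get_items_first dataset out) := by unfold Spec_get_items_first; infer_instance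

-- ===== CLAIM (what is proved, stated in full; the proofs are below) =====
def Claim_equal_get_items_first : Prop := ∀ (dataset : List (List Int)), Dom_get_items_first dataset → Spec_get_items_first dataset (get_items_first dataset)

-- ===== LEMMAS AND PROOFS =====

-- A's dedup step at the int level.
def pvDStep (acc : List Int) (i : Int) : List Int := if i ∈ acc then acc else acc ++ [i]

-- B's adjacent-dedup step.
def pvBStep (u : List Int) (x : Int) : List Int := if u.getLast? = some x then u else u ++ [x]

theorem pvFoldl_append_eq_flatten (l : List (List Int)) (acc : List Int) :
    l.foldl (fun a e => a ++ e) acc = acc ++ l.flatten := by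
  induction l generalizing acc with
  | nil => simp
  | cons e t ih => simp [List.foldl_cons, ih, List.append_assoc]

-- A's singleton-list fold is the image under [·] of the int-level dedup fold.
theorem pvAInner_eq_map (e : List Int) (acc : List Int) :
    e.foldl (fun items i => if [i] ∈ items then items else items ++ [[i]])
      (acc.map (fun x => [x]))
      = (e.foldl pvDStep acc).map (fun x => [x]) := by
  induction e generalizing acc with
  | nil => rfl
  | cons i t ih =>
    have hmem : ([i] ∈ acc.map (fun x => ([x] : List Int))) ↔ i ∈ acc := by
      simp
    by_cases h : i ∈ acc
    · simp [List.foldl_cons, pvDStep, h, hmem.2 h, ih]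
    · have : ¬ ([i] ∈ acc.map (fun x => ([x] : List Int))) := fun hc => h (hmem.1 hc)
      simp only [List.foldl_cons, pvDStep, if_neg h, if_neg this]
      have hmap : (acc.map (fun x => ([x] : List Int))) ++ [[i]]
          = (acc ++ [i]).map (fun x => ([x] : List Int)) := by simp
      rw [hmap]
      exact ih (acc ++ [i])

theorem pvA_outer_eq_map (ds : List (List Int)) (acc : List Int) :
    ds.foldl (fun items e =>
        e.foldl (fun items i => if [i] ∈ items then items else items ++ [[i]]) items)
      (acc.map (fun x => [x]))
      = (ds.flatten.foldl pvDStep acc).map (fun x => [x]) := by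
  induction ds generalizing acc with
  | nil => simp
  | cons e t ih =>
    simp only [List.foldl_cons, List.flatten_cons, List.foldl_append]
    rw [pvAInner_eq_map, ih]

theorem pvMem_dStepFold (flat : List Int) (acc : List Int) (a : Int) :
    a ∈ flat.foldl pvDStep acc ↔ a ∈ acc ∨ a ∈ flat := by
  induction flat generalizing acc with
  | nil => simp
  | cons i t ih =>
    simp only [List.foldl_cons, ih, pvDStep]
    by_cases h : i ∈ acc
    · simp only [if_pos h, List.mem_cons]
      constructor
      · tauto
      · rintro (hh | rfl | hh) <;> tauto
    · simp only [if_neg h, List.mem_append, List.mem_cons]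
      tauto

theorem pvNodup_dStepFold (flat : List Int) (acc : List Int) (h : acc.Nodup) :
    (flat.foldl pvDStep acc).Nodup := by
  induction flat generalizing acc with
  | nil => exact h
  | cons i t ih =>
    simp only [List.foldl_cons, pvDStep]
    by_cases hi : i ∈ acc
    · simp only [if_pos hi]; exact ih acc h
    · simp only [if_neg hi]
      refine ih (acc ++ [i]) ?_
      rw [List.nodup_append]
      refine ⟨h, by simp, ?_⟩
      intro a ha b hb he
      simp at hb
      subst hb
      exact hi (he ▸ ha)

theorem pvSingleton_lt (a b : Int) (h : a < b) : ([a] : List Int) < [b] :=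
  List.Lex.rel h

theorem pvPairwise_lt_of_le_nodup (l : List Int) (h : l.Pairwise (· ≤ ·)) (hn : l.Nodup) :
    l.Pairwise (· < ·) :=
  (h.and hn).imp (fun ⟨hle, hne⟩ => lt_of_le_of_ne hle hne)

-- two strictly increasing int lists with the same members are equal
theorem pvStrictSortedUnique (l₁ l₂ : List Int) (h1 : l₁.Pairwise (· < ·))
    (h2 : l₂.Pairwise (· < ·)) (h : ∀ a, a ∈ l₁ ↔ a ∈ l₂) : l₁ = l₂ := by
  induction l₁ generalizing l₂ with
  | nil => cases l₂ with
    | nil => rfl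
    | cons b t => simpa using (h b).2 (by simp)
  | cons a t ih =>
    cases l₂ with
    | nil => simpa using (h a).1 (by simp)
    | cons b t₂ =>
      have hab : a = b := by
        rcases (List.mem_cons.1 ((h a).1 (by simp))) with rfl | ha
        · rfl
        · rcases List.mem_cons.1 ((h b).2 (by simp)) with rfl | hb
          · rfl
          · have h1' := (List.pairwise_cons.1 h1).1 b hb
            have h2' := (List.pairwise_cons.1 h2).1 a ha
            omega
      subst hab
      have ht : ∀ x, x ∈ t ↔ x ∈ t₂ := by
        intro x
        constructor
        · intro hx
          have hlt := (List.pairwise_cons.1 h1).1 x hx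
          rcases List.mem_cons.1 ((h x).1 (by simp [hx])) with rfl | h'
          · omega
          · exact h'
        · intro hx
          have hlt := (List.pairwise_cons.1 h2).1 x hx
          rcases List.mem_cons.1 ((h x).2 (by simp [hx])) with rfl | h'
          · omega
          · exact h'
      rw [ih t₂ (List.pairwise_cons.1 h1).2 (List.pairwise_cons.1 h2).2 ht]

-- in a strictly increasing list every member bounded above by all members must be the last
theorem pvLast_of_max (u : List Int) (x : Int) (hu : u.Pairwise (· < ·)) (hx : x ∈ u)
    (hmax : ∀ a ∈ u, a ≤ x) : u.getLast? = some x := by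
  induction u with
  | nil => simp at hx
  | cons y ys ih =>
    cases ys with
    | nil => simp at hx ⊢; omega
    | cons z zs =>
      have hxys : x ∈ z :: zs := by
        rcases List.mem_cons.1 hx with rfl | h'
        · have h1 := (List.pairwise_cons.1 hu).1 z (by simp)
          have h2 := hmax z (by simp)
          omega
        · exact h'
      rw [List.getLast?_cons_cons]
      exact ih (List.pairwise_cons.1 hu).2 hxys (fun a ha => hmax a (List.mem_cons_of_mem _ ha))

-- B's adjacent-dedup fold over a ≤-sorted suffix: result strictly increasing, same members
theorem pvBFold_spec (xs : List Int) (u : List Int)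
    (hxs : xs.Pairwise (· ≤ ·)) (hu : u.Pairwise (· < ·))
    (hub : ∀ a ∈ u, ∀ b ∈ xs, a ≤ b) :
    (xs.foldl pvBStep u).Pairwise (· < ·) ∧
      (∀ a, a ∈ xs.foldl pvBStep u ↔ a ∈ u ∨ a ∈ xs) := by
  induction xs generalizing u with
  | nil => exact ⟨hu, by simp⟩
  | cons x t ih =>
    have hxt : ∀ b ∈ t, x ≤ b := (List.pairwise_cons.1 hxs).1
    have ht : t.Pairwise (· ≤ ·) := (List.pairwise_cons.1 hxs).2
    simp only [List.foldl_cons, pvBStep]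
    by_cases hlast : u.getLast? = some x
    · simp only [if_pos hlast]
      have hxu : x ∈ u := List.mem_of_getLast? hlast
      have hub' : ∀ a ∈ u, ∀ b ∈ t, a ≤ b := fun a ha b hb => hub a ha b (by simp [hb])
      obtain ⟨p1, p2⟩ := ih u ht hu hub'
      refine ⟨p1, fun a => ?_⟩
      rw [p2]
      constructor
      · tauto
      · rintro (h | h | h) <;> tauto
    · simp only [if_neg hlast]
      have hlt : ∀ a ∈ u, a < x := by
        intro a ha
        have hle := hub a ha x (by simp)
        rcases lt_or_eq_of_le hle with h | rfl
        · exact h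
        · exact absurd (pvLast_of_max u a hu ha (fun b hb => hub b hb a (by simp))) hlast
      have hu' : (u ++ [x]).Pairwise (· < ·) := by
        rw [List.pairwise_append]
        exact ⟨hu, by simp, by simpa using hlt⟩
      have hub' : ∀ a ∈ u ++ [x], ∀ b ∈ t, a ≤ b := by
        intro a ha b hb
        rcases List.mem_append.1 ha with h | h
        · exact hub a h b (by simp [hb])
        · simp at h; subst h; exact hxt b hb
      obtain ⟨p1, p2⟩ := ih (u ++ [x]) ht hu' hub'
      refine ⟨p1, fun a => ?_⟩
      rw [p2]
      simp only [List.mem_append, List.mem_cons]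
      tauto

-- ===== VERDICT (by name: the statement is the Claim_ definition above) =====
theorem get_items_first_spec : Claim_equal_get_items_first := by
  intro dataset _
  unfold Spec_get_items_first get_items_first get_items_first_alt
  simp only []
  -- names
  set flat := dataset.flatten with hflat
  have hAitems : dataset.foldl (fun items e =>
      e.foldl (fun items i => if [i] ∈ items then items else items ++ [[i]]) items) [] =
      (flat.foldl pvDStep []).map (fun x => [x]) := by
    have := pvA_outer_eq_map dataset []
    simpa using this
  set D := flat.foldl pvDStep [] with hD
  have hDnodup : D.Nodup := pvNodup_dStepFold flat [] (by simp)
  have hDmem : ∀ a, a ∈ D ↔ a ∈ flat := by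
    intro a; rw [hD, pvMem_dStepFold]; simp
  -- sorted D is strictly increasing with the same members as flat
  have hSDperm : (PySem.List.sorted D (id : Int → Int)).Perm D := PySem.List.sorted_perm D id false
  have hSDlt : (PySem.List.sorted D (id : Int → Int)).Pairwise (· < ·) := by
    refine pvPairwise_lt_of_le_nodup _ ?_ (hSDperm.nodup_iff.2 hDnodup)
    simpa using PySem.List.sorted_pairwise D (id : Int → Int)
  have hSDmem : ∀ a, a ∈ PySem.List.sorted D (id : Int → Int) ↔ a ∈ flat := by
    intro a; rw [hSDperm.mem_iff, hDmem]
  -- A = map singleton (sorted D)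
  have hA : PySem.List.sorted (D.map (fun x => [x])) (id : List Int → List Int)
      = (PySem.List.sorted D (id : Int → Int)).map (fun x => [x]) := by
    have h := @PySem.List.sorted_eq_of_perm_of_pairwise_lt (List Int) (List Int) inferInstance
      (D.map (fun x => [x])) ((PySem.List.sorted D (id : Int → Int)).map (fun x => [x])) id
      (hSDperm.map _)
      (List.Pairwise.map _ (fun {a b} h => pvSingleton_lt a b h) hSDlt)
    have hdec : (fun (a b : List Int) => a.decidableLT b)
        = @LinearOrder.toDecidableLT (List Int) inferInstance :=
      funext fun a => funext fun b => Subsingleton.elim _ _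
    have hbr := congrArg
      (fun d : DecidableLT (List Int) =>
        @PySem.List.sorted (List Int) (List Int) List.instLT d (D.map (fun x => [x])) id false)
      hdec
    simp only at hbr
    rw [hbr]
    exact h
  -- B side
  have hBflat : dataset.foldl (fun acc e => acc ++ e) [] = flat := by
    simpa using pvFoldl_append_eq_flatten dataset []
  set SF := PySem.List.sorted flat (id : Int → Int) with hSF
  have hSFle : SF.Pairwise (· ≤ ·) := by
    simpa using PySem.List.sorted_pairwise flat (id : Int → Int)
  have hSFmem : ∀ a, a ∈ SF ↔ a ∈ flat :=
    fun a => (PySem.List.sorted_perm flat id false).mem_iff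
  obtain ⟨hUlt, hUmem⟩ := pvBFold_spec SF [] hSFle (by simp) (by simp)
  -- the two int-level lists coincide
  have hkey : PySem.List.sorted D (id : Int → Int) = SF.foldl pvBStep [] := by
    apply pvStrictSortedUnique _ _ hSDlt hUlt
    intro a
    rw [hSDmem, hUmem]
    simp [hSFmem]
  rw [hAitems, hA, hkey, hBflat]
  rfl
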